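-- pv_equiv track=rewrite | github.com/chinmaysolanki/heatwise-your-urban-heat-solution- | ml/longitudinal_tracking/exporters/export_longitudinal_labels.py | _latest_by_window
-- ===== SOURCE A (Python) =====
-- from collections import defaultdict
-- from typing import Any
--
-- def _pick(d: dict[str, Any], *keys: str) -> Any:
--     for k in keys:
--         if k in d and d[k] is not None:
--             return d[k]
--     return None
--
-- def _latest_by_window(rows: list[dict[str, Any]]) -> dict[str, dict[str, Any]]:
--     """Latest remeasurement per window_label by measuredAt."""
--     by_w: dict[str, list[dict[str, Any]]] = defaultdict(list)
--     for r in rows: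
--         wl = str(_pick(r, "windowLabel", "window_label") or "")
--         if wl:
--             by_w[wl].append(r)
--     out: dict[str, dict[str, Any]] = {}
--     for wl, lst in by_w.items():
--         lst.sort(key=lambda x: str(_pick(x, "measuredAt", "measured_at") or ""))
--         out[wl] = lst[-1]
--     return out
-- ===== SOURCE B (Python) =====
-- def _field(r, primary, fallback):
--     v = r.get(primary)
--     if v is None:
--         v = r.get(fallback)
--     return str(v or "")
--
-- def _latest_by_window(rows):
--     """Single pass: keep, per window label, the row with the greatest measuredAt key (last on ties)."""
--     best = {}
--     for r in rows:
--         wl = _field(r, "windowLabel", "window_label")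
--         if not wl:
--             continue
--         k = _field(r, "measuredAt", "measured_at")
--         cur = best.get(wl)
--         if cur is None or _field(cur, "measuredAt", "measured_at") <= k:
--             best[wl] = r
--     return best
-- ===== Notes on version B (the rewrite author's own statement) =====
-- stated objective: alternative
-- what changed: Replaces grouping all rows per window label and then sorting each group by measuredAt to take its last element with a single streaming pass that keeps, per label, the row with the greatest measuredAt key (updating on >= so the last row wins ties, exactly as the stable sort does); it trades the sort for a running-maximum and never materialises the groups.
import Mathlib
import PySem

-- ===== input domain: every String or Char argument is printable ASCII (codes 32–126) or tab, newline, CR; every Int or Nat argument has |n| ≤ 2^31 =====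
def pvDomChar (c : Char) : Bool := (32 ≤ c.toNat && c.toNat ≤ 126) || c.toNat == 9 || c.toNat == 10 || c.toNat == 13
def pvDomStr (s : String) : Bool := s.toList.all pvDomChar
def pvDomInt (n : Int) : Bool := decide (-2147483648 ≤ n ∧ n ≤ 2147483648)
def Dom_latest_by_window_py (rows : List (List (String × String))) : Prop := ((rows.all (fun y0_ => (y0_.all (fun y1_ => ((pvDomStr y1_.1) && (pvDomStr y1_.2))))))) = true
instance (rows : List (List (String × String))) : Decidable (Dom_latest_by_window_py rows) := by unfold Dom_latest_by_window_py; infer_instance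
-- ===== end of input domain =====

-- B replaces A's group-then-sort-each-group by a single pass that keeps, per window label, the row
-- with the greatest measuredAt key (updating on ties keeps the last row, matching the stable sort);
-- the equivalence is about the RETURN value only (A also sorts its internal group lists in place).

-- ===== PORT A =====
-- first-match lookup in a (dict-as-)association list: 'k in d … d[k]'
def pvGetFirst : List (String × String) → String → Option String
  | [], _ => none
  | (k, v) :: t, key => if k = key then some v else pvGetFirst t key

-- _pick(r, k1, k2): values are strings here (never None), so the 'is not None' test always passes
def pvPick (r : List (String × String)) (k1 k2 : String) : Option String :=
  match pvGetFirst r k1 with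
  | some v => some v
  | none => pvGetFirst r k2

-- str(x or ""): a missing value becomes "" (an empty string stays "")
def pvOrEmpty (o : Option String) : String :=
  match o with
  | some v => v
  | none => ""

-- loop body of A's grouping loop: by_w[wl].append(r) for a non-empty label
def pvStepA (d : PySem.Dict String (List (List (String × String)))) (r : List (String × String)) :
    PySem.Dict String (List (List (String × String))) :=
  let wl := pvOrEmpty (pvPick r "windowLabel" "window_label")
  if wl ≠ "" then d.modify wl [] (· ++ [r]) else d

-- loop body of A's output loop: lst.sort(key=…); out[wl] = lst[-1]
-- (every stored list is nonempty, so pyGet? is some; getD only discharges the Option)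
def pvOutStep (o : PySem.Dict String (List (String × String)))
    (p : String × List (List (String × String))) : PySem.Dict String (List (String × String)) :=
  o.insert p.1
    ((PySem.List.pyGet?
      (PySem.List.sorted p.2 (fun x => pvOrEmpty (pvPick x "measuredAt" "measured_at")) false)
      (-1)).getD [])

def latest_by_window_py (rows : List (List (String × String))) : List (String × List (String × String)) :=
  ((rows.foldl pvStepA PySem.Dict.empty).items.foldl pvOutStep PySem.Dict.empty).items

-- ===== PORT B =====
-- _field(r, primary, fallback): r.get(primary), else r.get(fallback); missing/empty → ""
def pvFieldB (r : List (String × String)) (primary fallback : String) : String :=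
  match pvGetFirst r primary with
  | some v => v
  | none => (pvGetFirst r fallback).getD ""

-- loop body of B's single pass: keep the row with the greatest key, preferring the newer on ties
def pvStepB (best : PySem.Dict String (List (String × String))) (r : List (String × String)) :
    PySem.Dict String (List (String × String)) :=
  let wl := pvFieldB r "windowLabel" "window_label"
  if wl = "" then best
  else
    let k := pvFieldB r "measuredAt" "measured_at"
    match best.get? wl with
    | none => best.insert wl r
    | some cur => if pvFieldB cur "measuredAt" "measured_at" ≤ k then best.insert wl r else best

def latest_by_window_py_alt (rows : List (List (String × String))) : List (String × List (String × String)) :=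
  (rows.foldl pvStepB PySem.Dict.empty).items

-- ===== PRECONDITION & SPEC =====
def Spec_latest_by_window_py (rows : List (List (String × String))) (out : List (String × List (String × String))) : Prop := out = latest_by_window_py_alt rows
instance (rows : List (List (String × String))) (out : List (String × List (String × String))) : Decidable (Spec_latest_by_window_py rows out) := by unfold Spec_latest_by_window_py; infer_instance

-- ===== CLAIM (what is proved, stated in full; the proofs are below) =====
def Claim_equal_latest_by_window_py : Prop := ∀ (rows : List (List (String × String))), Dom_latest_by_window_py rows → Spec_latest_by_window_py rows (latest_by_window_py rows)

-- ===== LEMMAS AND PROOFS =====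

-- the measuredAt sort key of a row, as A computes it
def pvKf (x : List (String × String)) : String := pvOrEmpty (pvPick x "measuredAt" "measured_at")

-- B's per-group accumulator: the last row with maximal key
def pvGb (h : List (String × String)) (t : List (List (String × String))) : List (String × String) :=
  t.foldl (fun m x => if pvKf m ≤ pvKf x then x else m) h

def pvGbL : List (List (String × String)) → List (String × String)
  | [] => []
  | h :: t => pvGb h t

-- A's per-group value: last element of the stable sort by key
def pvLast (lst : List (List (String × String))) : List (String × String) :=
  (PySem.List.pyGet? (PySem.List.sorted lst pvKf false) (-1)).getD []

theorem pvFieldB_eq (r : List (String × String)) (k1 k2 : String) :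
    pvFieldB r k1 k2 = pvOrEmpty (pvPick r k1 k2) := by
  unfold pvFieldB pvPick pvOrEmpty
  cases pvGetFirst r k1 <;> cases pvGetFirst r k2 <;> rfl

theorem pvGb_append (h : List (String × String)) (t : List (List (String × String)))
    (x : List (String × String)) :
    pvGb h (t ++ [x]) = if pvKf (pvGb h t) ≤ pvKf x then x else pvGb h t := by
  simp [pvGb, List.foldl_append]

theorem insertBy_ne_nil {α : Type} (before : α → α → Bool) (x : α) (ys : List α) :
    PySem.List.insertBy before x ys ≠ [] := by
  cases ys with
  | nil => simp [PySem.List.insertBy]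
  | cons y t => unfold PySem.List.insertBy; split <;> simp

theorem insertBy_getLast? {α : Type} (before : α → α → Bool) (x : α) (ys : List α) :
    (PySem.List.insertBy before x ys).getLast? =
      if ys.any (fun y => before x y) then ys.getLast? else some x := by
  induction ys with
  | nil => rfl
  | cons y t ih =>
    by_cases h : before x y = true
    · simp [PySem.List.insertBy, h, List.getLast?_cons_cons]
    · have h' : before x y = false := by simpa using h
      have hstep : PySem.List.insertBy before x (y :: t) = y :: PySem.List.insertBy before x t := by
        cases t <;> simp [PySem.List.insertBy, h']
      rw [hstep]
      rcases hne : PySem.List.insertBy before x t with _ | ⟨z, t'⟩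
      · exact absurd hne (insertBy_ne_nil before x t)
      · rw [List.getLast?_cons_cons, ← hne, ih]
        by_cases ha : t.any (fun y => before x y) = true
        · rcases t with _ | ⟨w, t₂⟩
          · simp at ha
          · simp [ha, h', List.getLast?_cons_cons]
        · simp [ha, h']

-- in a key-sorted list, 'some element has key above x' reduces to a comparison with the last
theorem any_lt_last {α κ : Type} [LinearOrder κ] (k : α → κ) (ys : List α) (m : α)
    (hp : ys.Pairwise (fun a b => k a ≤ k b)) (hl : ys.getLast? = some m) (x : κ) :
    (ys.any (fun y => decide (x < k y))) = decide (x < k m) := by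
  induction ys with
  | nil => simp at hl
  | cons a t ih =>
    rcases t with _ | ⟨b, t'⟩
    · simp at hl; subst hl; simp
    · rw [List.getLast?_cons_cons] at hl
      have hp' := (List.pairwise_cons.mp hp).2
      have ham : k a ≤ k m :=
        (List.pairwise_cons.mp hp).1 m (List.mem_of_getLast? hl)
      rw [List.any_cons, ih hp' hl]
      by_cases hx : x < k a
      · have : x < k m := lt_of_lt_of_le hx ham
        simp [hx, this]
      · simp [hx]

theorem sorted_append_singleton (xs : List (List (String × String))) (x : List (String × String)) :
    PySem.List.sorted (xs ++ [x]) pvKf false =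
      PySem.List.insertBy (fun a b => decide (pvKf a < pvKf b)) x (PySem.List.sorted xs pvKf false) := by
  rw [PySem.List.sorted_eq_foldl_insertBy, PySem.List.sorted_eq_foldl_insertBy, List.foldl_append]
  rfl

-- central lemma: the last element of the stable sort is exactly B's fold over the group
theorem sorted_getLast_eq_gb (t : List (List (String × String))) (h : List (String × String)) :
    (PySem.List.sorted (h :: t) pvKf false).getLast? = some (pvGb h t) := by
  induction t using List.reverseRecOn with
  | nil =>
    rw [PySem.List.sorted_eq_self_of_pairwise _ _ (List.pairwise_singleton _ _)]
    rfl
  | append_singleton t x ih =>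
    have hsplit : h :: (t ++ [x]) = (h :: t) ++ [x] := by simp
    rw [hsplit, sorted_append_singleton, insertBy_getLast?,
      any_lt_last pvKf _ (pvGb h t) (PySem.List.sorted_pairwise _ _) ih (pvKf x),
      pvGb_append]
    by_cases hlt : pvKf x < pvKf (pvGb h t)
    · simp [hlt, ih, not_le.mpr hlt]
    · simp [hlt, not_lt.mp hlt]

theorem pvLast_eq_gbL (lst : List (List (String × String))) (h : lst ≠ []) :
    pvLast lst = pvGbL lst := by
  rcases lst with _ | ⟨h0, t0⟩
  · simp at h
  · rw [pvLast, PySem.List.pyGet?_neg_one, sorted_getLast_eq_gb]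
    rfl

-- the main invariant, by induction from the right over the row list
theorem pvInv (rows : List (List (String × String))) :
    (rows.foldl pvStepA PySem.Dict.empty).keys.Nodup ∧
    (∀ p ∈ (rows.foldl pvStepA PySem.Dict.empty).items, p.2 ≠ []) ∧
    (rows.foldl pvStepB PySem.Dict.empty).items
      = (rows.foldl pvStepA PySem.Dict.empty).items.map (fun p => (p.1, pvGbL p.2)) := by
  induction rows using List.reverseRecOn with
  | nil =>
    refine ⟨PySem.Dict.nodup_keys_empty, ?_, ?_⟩ <;> simp [PySem.Dict.empty]
  | append_singleton rows r ih =>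
    obtain ⟨hnd, hne, hitems⟩ := ih
    rw [List.foldl_append, List.foldl_append]
    simp only [List.foldl_cons, List.foldl_nil]
    set A := rows.foldl pvStepA PySem.Dict.empty with hA
    set B := rows.foldl pvStepB PySem.Dict.empty with hB
    have hkeys : B.keys = A.keys := by
      show B.items.map (·.1) = A.items.map (·.1)
      rw [hitems, List.map_map]
      rfl
    by_cases hwl : pvOrEmpty (pvPick r "windowLabel" "window_label") = ""
    · simp only [pvStepA, pvStepB, pvFieldB_eq, hwl, ne_eq, not_true_eq_false, if_false, if_true]
      exact ⟨hnd, hne, hitems⟩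
    · have hcB : B.contains (pvOrEmpty (pvPick r "windowLabel" "window_label"))
          = A.contains (pvOrEmpty (pvPick r "windowLabel" "window_label")) := by
        rw [PySem.Dict.contains_eq_decide_mem_keys, PySem.Dict.contains_eq_decide_mem_keys, hkeys]
      set wl := pvOrEmpty (pvPick r "windowLabel" "window_label") with hwldef
      have hstepA : pvStepA A r = A.insert wl (A.getD wl [] ++ [r]) := by
        simp only [pvStepA, ← hwldef, if_pos hwl, PySem.Dict.modify]
      by_cases hc : A.contains wl = true
      · -- the label is already present: its list is nonempty, B holds its fold value
        obtain ⟨lst, hget⟩ : ∃ lst, A.get? wl = some lst := by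
          have := PySem.Dict.contains_eq_isSome_get? A wl
          rw [hc] at this
          exact Option.isSome_iff_exists.mp this.symm
        have hlstmem : (wl, lst) ∈ A.items := PySem.Dict.mem_items_of_get?_eq_some A hget
        have hlstne : lst ≠ [] := hne (wl, lst) hlstmem
        have hndB : B.keys.Nodup := hkeys ▸ hnd
        have hBget : B.get? wl = some (pvGbL lst) := by
          refine PySem.Dict.get?_of_mem_items B ?_ hndB
          rw [hitems]
          exact List.mem_map_of_mem hlstmem
        have hgetD : A.getD wl [] = lst := PySem.Dict.getD_of_get?_eq_some A [] hget
        obtain ⟨h0, t0, rfl⟩ : ∃ h0 t0, lst = h0 :: t0 := by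
          rcases lst with _ | ⟨h0, t0⟩
          · simp at hlstne
          · exact ⟨h0, t0, rfl⟩
        have hgb : pvGbL ((h0 :: t0) ++ [r])
            = if pvKf (pvGb h0 t0) ≤ pvKf r then r else pvGb h0 t0 := by
          show pvGb h0 (t0 ++ [r]) = _
          exact pvGb_append h0 t0 r
        have hcB' : B.contains wl = true := hcB.trans hc
        have hstepB : pvStepB B r
            = if pvKf (pvGb h0 t0) ≤ pvKf r then B.insert wl r else B := by
          simp only [pvStepB, pvFieldB_eq, ← hwldef, if_neg hwl, hBget]
          rfl
        have hAitems : (pvStepA A r).items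
            = A.items.map (fun p => if p.1 == wl then (wl, (h0 :: t0) ++ [r]) else p) := by
          rw [hstepA, hgetD]
          exact PySem.Dict.items_insert_of_contains A _ hc
        refine ⟨?_, ?_, ?_⟩
        · rw [hstepA]; exact PySem.Dict.nodup_keys_insert A _ _ hnd
        · intro p hp
          rw [hAitems] at hp
          obtain ⟨q, hq, hpq⟩ := List.mem_map.mp hp
          by_cases hqw : q.1 == wl
          · rw [if_pos hqw] at hpq; subst hpq; simp
          · rw [if_neg hqw] at hpq; subst hpq; exact hne q hq
        · rw [hstepB, hAitems, List.map_map]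
          by_cases hle : pvKf (pvGb h0 t0) ≤ pvKf r
          · rw [if_pos hle,
              PySem.Dict.items_insert_of_contains B r hcB', hitems, List.map_map]
            refine List.map_congr_left ?_
            intro p hp
            by_cases hpw : p.1 = wl
            · simp only [Function.comp_apply, hpw, beq_self_eq_true, if_true, hgb, if_pos hle]
            · simp [hpw]
          · rw [if_neg hle, hitems]
            refine (List.map_congr_left ?_).symm
            intro p hp
            by_cases hpw : p.1 = wl
            · have hp2 : p.2 = h0 :: t0 := by
                have : A.get? wl = some p.2 := by
                  refine PySem.Dict.get?_of_mem_items A ?_ hnd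
                  have : p = (wl, p.2) := by rw [← hpw]
                  rw [← this]; exact hp
                rw [hget] at this
                exact (Option.some_injective _ this).symm
              simp only [Function.comp_apply, hpw, beq_self_eq_true, if_true, hgb, if_neg hle]
              rw [← hpw, hp2]
              rfl
            · simp only [Function.comp_apply]
              rw [if_neg (by simpa using hpw)]
      · -- a fresh label: both sides append a new entry
        have hc' : A.contains wl = false := by simpa using hc
        have hcB' : B.contains wl = false := by rw [hcB]; exact hc'
        have hBget : B.get? wl = none := (PySem.Dict.get?_eq_none_iff_contains B wl).mpr hcB'
        have hgetD : A.getD wl [] = [] := PySem.Dict.getD_of_not_contains A [] hc'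
        have hstepB : pvStepB B r = B.insert wl r := by
          simp only [pvStepB, pvFieldB_eq, ← hwldef, if_neg hwl, hBget]
        have hAitems : (pvStepA A r).items = A.items ++ [(wl, [r])] := by
          rw [hstepA, hgetD]
          exact PySem.Dict.items_insert_of_not_contains A _ hc'
        refine ⟨?_, ?_, ?_⟩
        · rw [hstepA]; exact PySem.Dict.nodup_keys_insert A _ _ hnd
        · intro p hp
          rw [hAitems] at hp
          rcases List.mem_append.mp hp with hp' | hp'
          · exact hne p hp'
          · simp only [List.mem_singleton] at hp'
            subst hp'
            simp
        · rw [hstepB, PySem.Dict.items_insert_of_not_contains B r hcB', hAitems,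
            List.map_append, hitems]
          rfl

-- ===== VERDICT (by name: the statement is the Claim_ definition above) =====
theorem latest_by_window_py_spec : Claim_equal_latest_by_window_py := by
  intro rows _
  show latest_by_window_py rows = latest_by_window_py_alt rows
  obtain ⟨hnd, hne, hitems⟩ := pvInv rows
  rw [latest_by_window_py, latest_by_window_py_alt, hitems]
  have hstep : pvOutStep
      = fun (o : PySem.Dict String (List (String × String)))
          (p : String × List (List (String × String))) => o.insert p.1 (pvLast p.2) := rfl
  rw [hstep,
    PySem.Dict.items_foldl_insert_fresh
      (rows.foldl pvStepA PySem.Dict.empty).items Prod.fst (fun p => pvLast p.2)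
      PySem.Dict.empty (by intro a _; simp) hnd]
  simp only [PySem.Dict.empty, List.nil_append]
  refine List.map_congr_left ?_
  intro p hp
  rw [pvLast_eq_gbL p.2 (hne p hp)]
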